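-- pv_equiv track=rewrite | github.com/bcdunn7/Unit-18-Python-Data-Structures | 34_same_frequency/same_frequency.py | same_frequency
-- ===== SOURCE A (Python) =====
-- def same_frequency(num1, num2):
--     """Do these nums have same frequencies of digits?
--
--         >>> same_frequency(551122, 221515)
--         True
--
--         >>> same_frequency(321142, 3212215)
--         False
--
--         >>> same_frequency(1212, 2211)
--         True
--     """
--
--     num1_freqs = {}
--     num2_freqs = {}
--
--     for num in str(num1):
--         num1_freqs[num] = num1_freqs.get(num, 0) + 1
--
--     for num in str(num2):
--         num2_freqs[num] = num2_freqs.get(num, 0) + 1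
--
--     return num1_freqs == num2_freqs
-- ===== SOURCE B (Python) =====
-- def same_frequency(num1, num2):
--     """Do these nums have same frequencies of digits?"""
--     return sorted(str(num1)) == sorted(str(num2))
-- ===== Notes on version B (the rewrite author's own statement) =====
-- stated objective: idiomatic
-- what changed: Replaces the two hand-built frequency dictionaries and dict comparison by sorting the two digit strings and comparing the sorted character lists (multisets are equal iff their sorted forms are equal).
import Mathlib
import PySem

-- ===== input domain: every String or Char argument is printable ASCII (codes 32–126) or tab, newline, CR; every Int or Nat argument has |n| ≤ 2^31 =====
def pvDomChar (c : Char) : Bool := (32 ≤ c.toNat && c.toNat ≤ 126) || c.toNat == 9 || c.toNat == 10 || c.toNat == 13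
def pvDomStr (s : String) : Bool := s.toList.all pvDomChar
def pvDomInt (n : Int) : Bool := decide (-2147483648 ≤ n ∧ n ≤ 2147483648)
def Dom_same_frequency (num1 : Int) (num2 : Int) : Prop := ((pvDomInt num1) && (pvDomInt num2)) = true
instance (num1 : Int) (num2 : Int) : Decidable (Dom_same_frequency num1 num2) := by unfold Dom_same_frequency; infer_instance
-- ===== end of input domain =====

-- B compares sorted digit strings instead of building and comparing frequency dictionaries; same return value everywhere.

-- ===== PORT A =====
-- Python's `d1 == d2` on dicts compares them as mappings (ignoring insertion order):
-- every (key, value) item of each is looked up successfully in the other.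
def pyDictEq (d1 d2 : PySem.Dict Char Int) : Bool :=
  d1.items.all (fun kv => d2.get? kv.1 == some kv.2) &&
  d2.items.all (fun kv => d1.get? kv.1 == some kv.2)

def same_frequency (num1 : Int) (num2 : Int) : Bool :=
  let num1_freqs := (PySem.Int.toChars num1).foldl
    (fun d c => d.insert c (d.getD c 0 + 1)) (PySem.Dict.empty : PySem.Dict Char Int)
  let num2_freqs := (PySem.Int.toChars num2).foldl
    (fun d c => d.insert c (d.getD c 0 + 1)) (PySem.Dict.empty : PySem.Dict Char Int)
  pyDictEq num1_freqs num2_freqs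

-- ===== PORT B =====
def same_frequency_alt (num1 : Int) (num2 : Int) : Bool :=
  PySem.List.sorted (PySem.Int.toChars num1) (fun c => c) ==
  PySem.List.sorted (PySem.Int.toChars num2) (fun c => c)

-- ===== PRECONDITION & SPEC =====
def Spec_same_frequency (num1 : Int) (num2 : Int) (out : Bool) : Prop := out = same_frequency_alt num1 num2
instance (num1 : Int) (num2 : Int) (out : Bool) : Decidable (Spec_same_frequency num1 num2 out) := by unfold Spec_same_frequency; infer_instance

-- ===== CLAIM (what is proved, stated in full; the proofs are below) =====
def Claim_equal_same_frequency : Prop := ∀ (num1 : Int) (num2 : Int), Dom_same_frequency num1 num2 → Spec_same_frequency num1 num2 (same_frequency num1 num2)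

-- ===== LEMMAS AND PROOFS =====

-- get? of a dict whose item list is a map of (k, f k) pairs
lemma get?_mk_map (l : List Char) (f : Char → Int) (k : Char) :
    (PySem.Dict.mk (l.map (fun x => (x, f x)))).get? k
      = if k ∈ l then some (f k) else none := by
  induction l with
  | nil => simp [PySem.Dict.get?]
  | cons a t ih =>
    by_cases h : a = k
    · subst h; simp [PySem.Dict.get?_mk_cons]
    · simp [PySem.Dict.get?_mk_cons, h, ih, Ne.symm h]

lemma get?_counter (xs : List Char) (k : Char) :
    (PySem.Dict.counter xs).get? k
      = if k ∈ xs then some ((xs.count k : Int)) else none := by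
  have h : PySem.Dict.counter xs
      = PySem.Dict.mk ((PySem.Set.ofList xs).map (fun x => (x, (xs.count x : Int)))) := by
    apply PySem.Dict.ext
    simpa using PySem.Dict.items_counter xs
  rw [h, get?_mk_map]
  simp [PySem.Set.mem_ofList]

lemma pyDictEq_counter (xs ys : List Char) :
    pyDictEq (PySem.Dict.counter xs) (PySem.Dict.counter ys) = true ↔ xs.Perm ys := by
  rw [List.perm_iff_count]
  unfold pyDictEq
  simp only [Bool.and_eq_true, List.all_eq_true, PySem.Dict.items_counter,
    List.mem_map, get?_counter]
  constructor
  · rintro ⟨h1, h2⟩ k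
    by_cases hx : k ∈ xs
    · have := h1 _ ⟨k, by simpa [PySem.Set.mem_ofList] using hx, rfl⟩
      simp only [beq_iff_eq] at this
      by_cases hy : k ∈ ys
      · simp [hy] at this; omega
      · simp [hy] at this
    · by_cases hy : k ∈ ys
      · have := h2 _ ⟨k, by simpa [PySem.Set.mem_ofList] using hy, rfl⟩
        simp only [beq_iff_eq] at this
        simp [hx] at this
      · simp [List.count_eq_zero_of_not_mem, hx, hy]
  · intro h
    constructor
    · rintro kv ⟨k, hk, rfl⟩
      have hx : k ∈ xs := by simpa [PySem.Set.mem_ofList] using hk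
      have hy : k ∈ ys := by
        have := h k
        have : 0 < ys.count k := by
          have := List.count_pos_iff.mpr hx; omega
        exact List.count_pos_iff.mp this
      simp [hy, h k]
    · rintro kv ⟨k, hk, rfl⟩
      have hy : k ∈ ys := by simpa [PySem.Set.mem_ofList] using hk
      have hx : k ∈ xs := by
        have := h k
        have : 0 < xs.count k := by
          have := List.count_pos_iff.mpr hy; omega
        exact List.count_pos_iff.mp this
      simp [hx, h k]

lemma sorted_eq_iff_perm (xs ys : List Char) :
    (PySem.List.sorted xs (fun c => c) = PySem.List.sorted ys (fun c => c)) ↔ xs.Perm ys := by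
  constructor
  · intro h
    have p1 := PySem.List.sorted_perm xs (fun c => c) false
    have p2 := PySem.List.sorted_perm ys (fun c => c) false
    exact (p1.symm.trans (h ▸ p2))
  · intro h
    apply PySem.List.sorted_id_eq_of_perm_of_pairwise
    · exact (PySem.List.sorted_perm ys (fun c => c) false).trans h.symm
    · exact PySem.List.sorted_pairwise ys (fun c => c)

lemma main_eq (xs ys : List Char) :
    pyDictEq (PySem.Dict.counter xs) (PySem.Dict.counter ys)
      = (PySem.List.sorted xs (fun c => c) == PySem.List.sorted ys (fun c => c)) := by
  rw [Bool.eq_iff_iff, pyDictEq_counter, beq_iff_eq, sorted_eq_iff_perm]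

-- ===== VERDICT (by name: the statement is the Claim_ definition above) =====
theorem same_frequency_spec : Claim_equal_same_frequency := by
  intro num1 num2 _
  unfold Spec_same_frequency same_frequency same_frequency_alt
  simp only [PySem.Dict.foldl_insert_getD_add_one_eq_counter]
  exact main_eq _ _
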